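-- pv_equiv track=rewrite | github.com/m4gnum-opus/univalence-gravity | sim/prototyping/14c_entropic_convergence_sup_half.py | compute_boundary_area
-- ===== SOURCE A (Python) =====
-- def compute_boundary_area(
--     cells: frozenset[int],
--     internal_links: list[tuple[int, int]],
--     faces_per_cell: int,
-- ) -> int:
--     internal_within = sum(
--         1 for c1, c2 in internal_links
--         if c1 in cells and c2 in cells
--     )
--     return faces_per_cell * len(cells) - 2 * internal_within
-- ===== SOURCE B (Python) =====
-- def compute_boundary_area(
--     cells,
--     internal_links,
--     faces_per_cell,
-- ):
--     # Pre_ excludes cell lists with duplicates: 'cells' is a frozenset in A,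
--     # so a list with repeated elements is not a valid representation of it.
--     endpoints = []
--     for c1, c2 in internal_links:
--         if c1 in cells and c2 in cells:
--             endpoints += [c1, c2]
--     degree = {}
--     for c in endpoints:
--         degree[c] = degree.get(c, 0) + 1
--     return sum(faces_per_cell - degree.get(c, 0) for c in cells)
-- ===== Notes on version B (the rewrite author's own statement) =====
-- stated objective: alternative
-- what changed: B first collects the endpoints of links internal to the cell set, builds a per-cell degree table (dict), and computes the area as a second pass summing faces_per_cell minus each cell's degree, instead of A's single filtered count with a closed-form subtraction; Pre_ only pins the list representation of the frozenset 'cells' to duplicate-free lists.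
import Mathlib
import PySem

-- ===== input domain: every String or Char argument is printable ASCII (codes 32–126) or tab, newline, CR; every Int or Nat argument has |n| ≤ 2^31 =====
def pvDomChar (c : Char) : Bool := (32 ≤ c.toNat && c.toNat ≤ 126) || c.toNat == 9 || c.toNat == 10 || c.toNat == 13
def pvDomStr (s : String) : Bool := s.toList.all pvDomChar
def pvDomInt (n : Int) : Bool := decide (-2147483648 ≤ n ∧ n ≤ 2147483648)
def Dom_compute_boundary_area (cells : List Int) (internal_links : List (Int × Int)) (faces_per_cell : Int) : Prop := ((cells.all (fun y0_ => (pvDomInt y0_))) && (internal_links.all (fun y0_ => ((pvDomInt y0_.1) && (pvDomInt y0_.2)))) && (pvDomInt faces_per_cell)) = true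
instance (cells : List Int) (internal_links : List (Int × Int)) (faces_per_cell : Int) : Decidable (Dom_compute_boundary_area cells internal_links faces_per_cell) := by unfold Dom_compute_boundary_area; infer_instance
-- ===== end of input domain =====

-- B builds an explicit per-cell degree table and sums faces_per_cell minus each cell's
-- degree, instead of A's single filtered link count (alternative decomposition, same cost).
-- ===== PORT A =====
def compute_boundary_area (cells : List Int) (internal_links : List (Int × Int)) (faces_per_cell : Int) : Int :=
  let internal_within : Int :=
    internal_links.foldl
      (fun n l => if cells.contains l.1 && cells.contains l.2 then n + 1 else n) 0
  faces_per_cell * (cells.length : Int) - 2 * internal_within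

-- ===== PORT B =====
def compute_boundary_area_alt (cells : List Int) (internal_links : List (Int × Int)) (faces_per_cell : Int) : Int :=
  let endpoints : List Int :=
    internal_links.foldl
      (fun acc l =>
        if cells.contains l.1 && cells.contains l.2 then acc ++ [l.1, l.2] else acc) []
  let degree : PySem.Dict Int Int :=
    endpoints.foldl (fun d c => d.insert c (d.getD c 0 + 1)) PySem.Dict.empty
  cells.foldl (fun s c => s + (faces_per_cell - degree.getD c 0)) 0

-- ===== PRECONDITION & SPEC =====
-- Pre_ excludes cell lists with duplicate elements: 'cells' is a frozenset in the
-- Python, so a list with repeated elements is not a valid representation of it.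
def Pre_compute_boundary_area (cells : List Int) (internal_links : List (Int × Int)) (faces_per_cell : Int) : Prop := List.dedup cells = cells
instance (cells : List Int) (internal_links : List (Int × Int)) (faces_per_cell : Int) : Decidable (Pre_compute_boundary_area cells internal_links faces_per_cell) := by unfold Pre_compute_boundary_area; infer_instance
def pvWitness_compute_boundary_area : List Int × (List (Int × Int)) × Int := ([1, 2, 3], [(1, 2), (2, 3), (1, 5)], 4)

def Spec_compute_boundary_area (cells : List Int) (internal_links : List (Int × Int)) (faces_per_cell : Int) (out : Int) : Prop := out = compute_boundary_area_alt cells internal_links faces_per_cell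
instance (cells : List Int) (internal_links : List (Int × Int)) (faces_per_cell : Int) (out : Int) : Decidable (Spec_compute_boundary_area cells internal_links faces_per_cell out) := by unfold Spec_compute_boundary_area; infer_instance

-- ===== CLAIM (what is proved, stated in full; the proofs are below) =====
def Claim_equal_compute_boundary_area : Prop := ∀ (cells : List Int) (internal_links : List (Int × Int)) (faces_per_cell : Int), Dom_compute_boundary_area cells internal_links faces_per_cell → Pre_compute_boundary_area cells internal_links faces_per_cell → Spec_compute_boundary_area cells internal_links faces_per_cell (compute_boundary_area cells internal_links faces_per_cell)

-- ===== LEMMAS AND PROOFS =====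

-- the membership test used by both ports
def pvIn (cells : List Int) (l : Int × Int) : Bool := cells.contains l.1 && cells.contains l.2

-- the two endpoints a kept link contributes
def pvEnds (cells : List Int) (l : Int × Int) : List Int := if pvIn cells l then [l.1, l.2] else []

set_option maxRecDepth 4000 in
theorem pv_sum_count_cons (cells t : List Int) (x : Int) :
    (cells.map (fun c => (((x :: t).count c : Nat) : Int))).sum
    = (cells.map (fun c => ((t.count c : Nat) : Int))).sum + ((cells.count x : Nat) : Int) := by
  induction cells with
  | nil => simp
  | cons y ys ih =>
    simp only [List.map_cons, List.sum_cons, List.count_cons] at *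
    rw [ih]
    by_cases h : x = y
    · subst h
      rw [if_pos (beq_self_eq_true x)]
      push_cast; omega
    · rw [if_neg (fun hb => h (beq_iff_eq.mp hb).symm),
          if_neg (fun hb : (x == y) = true => h (beq_iff_eq.mp hb))]
      push_cast; omega

-- Σ over a Nodup list of occurrence counts of a list supported inside it = its length
theorem pv_sum_counts (cells ep : List Int) (hnd : cells.Nodup)
    (hsub : ∀ x ∈ ep, x ∈ cells) :
    (cells.map (fun c => ((ep.count c : Nat) : Int))).sum = (ep.length : Int) := by
  induction ep with
  | nil => simp
  | cons x t ih =>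
    have hx : x ∈ cells := hsub x List.mem_cons_self
    have hc : cells.count x = 1 := List.count_eq_one_of_mem hnd hx
    rw [pv_sum_count_cons, ih (fun y hy => hsub y (List.mem_cons_of_mem _ hy)), hc]
    simp only [List.length_cons]; push_cast; ring

theorem pv_sum_sub (cells : List Int) (f : Int) (g : Int → Int) :
    (cells.map (fun c => f - g c)).sum = f * (cells.length : Int) - (cells.map g).sum := by
  induction cells with
  | nil => simp
  | cons y ys ih => simp only [List.map_cons, List.sum_cons, ih, List.length_cons]; push_cast; ring

theorem pv_flat_len (cells : List Int) (links : List (Int × Int)) :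
    ((links.flatMap (pvEnds cells)).length : Int) = 2 * (links.countP (pvIn cells) : Int) := by
  induction links with
  | nil => simp
  | cons l t ih =>
    rw [List.flatMap_cons, List.countP_cons]
    unfold pvEnds at ih ⊢
    by_cases h : pvIn cells l = true
    · rw [if_pos h, if_pos h, List.length_append]
      simp only [List.length_cons, List.length_nil]
      push_cast at ih ⊢; omega
    · rw [if_neg h, if_neg h, List.nil_append]
      push_cast at ih ⊢; omega

theorem pv_flat_mem (cells : List Int) (links : List (Int × Int)) (x : Int)
    (hx : x ∈ links.flatMap (pvEnds cells)) : x ∈ cells := by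
  rcases List.mem_flatMap.mp hx with ⟨l, _, hxl⟩
  unfold pvEnds pvIn at hxl
  by_cases h : (cells.contains l.1 && cells.contains l.2) = true
  · rw [if_pos h] at hxl
    have h1 := (Bool.and_eq_true _ _).mp h
    rcases List.mem_cons.mp hxl with rfl | hxl2
    · exact List.contains_iff_mem.mp h1.1
    · rcases List.mem_cons.mp hxl2 with rfl | h3
      · exact List.contains_iff_mem.mp h1.2
      · cases h3
  · rw [if_neg h] at hxl
    cases hxl

-- ===== VERDICT (by name: the statement is the Claim_ definition above) =====
theorem compute_boundary_area_spec : Claim_equal_compute_boundary_area := by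
  intro cells links f _ hpre
  have hpre : cells.Nodup := by
    unfold Pre_compute_boundary_area at hpre
    rw [← hpre]; exact List.nodup_dedup cells
  unfold Spec_compute_boundary_area
  simp only [compute_boundary_area, compute_boundary_area_alt]
  -- A's loop is a countP
  rw [PySem.List.foldl_if_add_one (p := fun l : Int × Int => cells.contains l.1 && cells.contains l.2)]
  -- B's first loop builds a flatMap
  have hfun : (fun (acc : List Int) (l : Int × Int) =>
      if cells.contains l.1 && cells.contains l.2 then acc ++ [l.1, l.2] else acc)
      = (fun acc l => acc ++ pvEnds cells l) := by
    funext acc l; unfold pvEnds pvIn; split <;> simp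
  rw [hfun, PySem.List.foldl_append_eq_flatMap, List.nil_append]
  set ep := links.flatMap (pvEnds cells) with hep
  -- B's dict lookups are counts
  have hdeg : ∀ c : Int,
      (ep.foldl (fun d c => d.insert c (d.getD c 0 + 1)) PySem.Dict.empty).getD c 0
      = ((ep.count c : Nat) : Int) := by
    intro c
    rw [PySem.Dict.getD_foldl_insert_add_one]
    simp [PySem.Dict.empty, PySem.Dict.getD, PySem.Dict.get?]
  have hbody : (fun (s : Int) (c : Int) =>
      s + (f - (ep.foldl (fun d c => d.insert c (d.getD c 0 + 1)) PySem.Dict.empty).getD c 0))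
      = (fun s c => s + (f - ((ep.count c : Nat) : Int))) := by
    funext s c; rw [hdeg]
  rw [hbody, PySem.List.foldl_add (g := fun c => f - ((ep.count c : Nat) : Int)), pv_sum_sub,
      pv_sum_counts cells ep hpre (pv_flat_mem cells links), pv_flat_len]
  have hP : pvIn cells = fun l : Int × Int => cells.contains l.1 && cells.contains l.2 := rfl
  rw [hP]
  ring
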